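-- pv_equiv track=rewrite | github.com/guptaanmol184/problem-solving | contests/leetcode/weekly/305/2.py | reachableNodes
-- ===== SOURCE A (Python) =====
-- from typing import List
--
-- from collections import defaultdict
--
-- def reachableNodes(n: int, edges: List[List[int]], restricted: List[int]) -> int:
--     res = set(restricted)
--
--     edge_dict = defaultdict(list)
--     for x, y in edges:
--         edge_dict[x].append(y)
--         edge_dict[y].append(x)
--
--     visited = set()
--     def dfs(node, edge_dict) -> int:
--             if node in res or node in visited:
--                 return 0
--             else:
--                 visited.add(node)
--                 s = 1
--                 for a in edge_dict[node]:
--                         s += dfs(a, edge_dict)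
--                 return s
--
--     return dfs(0, edge_dict)
-- ===== SOURCE B (Python) =====
-- from typing import List
--
--
-- def reachableNodes(n: int, edges: List[List[int]], restricted: List[int]) -> int:
--     adj = {}
--     for x, y in edges:
--         adj.setdefault(x, []).append(y)
--         adj.setdefault(y, []).append(x)
--
--     blocked = set(restricted)
--     seen = set()
--     stack = [0]
--     count = 0
--     while stack:
--         node = stack.pop()
--         if node in blocked or node in seen:
--             continue
--         seen.add(node)
--         count += 1
--         stack.extend(reversed(adj.get(node, [])))
--     return count
-- ===== Notes on version B (the rewrite author's own statement) =====
-- stated objective: idiomatic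
-- what changed: The recursive DFS with a mutated outer visited set is replaced by an iterative explicit-stack traversal with a running count (no recursion, no nested closure), which also avoids Python's recursion-depth limit on deep graphs.
import Mathlib
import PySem

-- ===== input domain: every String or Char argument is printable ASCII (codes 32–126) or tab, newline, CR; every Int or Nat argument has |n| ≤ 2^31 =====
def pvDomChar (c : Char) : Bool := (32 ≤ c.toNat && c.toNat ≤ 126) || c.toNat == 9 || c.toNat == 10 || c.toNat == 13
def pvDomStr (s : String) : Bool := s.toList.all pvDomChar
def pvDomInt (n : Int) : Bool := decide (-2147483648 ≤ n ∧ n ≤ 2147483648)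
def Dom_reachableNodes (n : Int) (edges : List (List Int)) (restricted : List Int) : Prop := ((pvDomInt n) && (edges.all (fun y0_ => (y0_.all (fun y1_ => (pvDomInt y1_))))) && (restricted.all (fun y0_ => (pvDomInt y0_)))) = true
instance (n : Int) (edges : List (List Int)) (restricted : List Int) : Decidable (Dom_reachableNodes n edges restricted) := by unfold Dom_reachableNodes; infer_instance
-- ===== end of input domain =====

-- B replaces A's recursive DFS (nested closure mutating an outer visited set) by an iterative
-- explicit-stack traversal with a running count; same adjacency building, same return value.

-- ===== PORT A =====
-- defaultdict(list): edge_dict[x].append(y) = modify x [] (· ++ [y]); reading edge_dict[node]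
-- in dfs only inserts a dead empty entry, so it is ported as getD node [] (result-exact).
def pvBuildAdjA (edges : List (List Int)) : PySem.Dict Int (List Int) :=
  edges.foldl (fun d e =>
    match e with
    | [x, y] => (d.modify x [] (· ++ [y])).modify y [] (· ++ [x])
    | _ => d) PySem.Dict.empty

-- the recursive dfs; the mutable outer 'visited' is threaded through; the Nat argument is a
-- fuel guard making the recursion total (pvDfsA_suff below shows it never runs out)
def pvDfsA (res : PySem.Set Int) (adj : PySem.Dict Int (List Int)) :
    Nat → Int → PySem.Set Int → Option (Int × PySem.Set Int)
  | 0, _, _ => none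
  | f + 1, node, visited =>
    if PySem.Set.contains res node || PySem.Set.contains visited node then
      some (0, visited)
    else
      (adj.getD node []).foldl
        (fun acc a => acc.bind fun sv =>
          (pvDfsA res adj f a sv.2).map fun r => (sv.1 + r.1, r.2))
        (some (1, PySem.Set.add visited node))

def reachableNodes (n : Int) (edges : List (List Int)) (restricted : List Int) : Int :=
  let res := PySem.Set.ofList restricted
  let adj := pvBuildAdjA edges
  match pvDfsA res adj (adj.keys.length + 2) 0 PySem.Set.empty with
  | some r => r.1
  | none => 0  -- fuel exhausted: unreachable (pvDfsA_suff)

-- ===== PORT B =====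
def pvBuildAdjB (edges : List (List Int)) : PySem.Dict Int (List Int) :=
  edges.foldl (fun d e =>
    match e with
    | [x, y] => (d.modify x [] (· ++ [y])).modify y [] (· ++ [x])
    | _ => d) PySem.Dict.empty

-- termination helpers for the while loop (used only by decreasing_by)
theorem pvFilterLenMono (U : List Int) (p q : Int → Bool) (h : ∀ u, p u = true → q u = true) :
    (U.filter p).length ≤ (U.filter q).length := by
  induction U with
  | nil => simp
  | cons u U ih =>
    by_cases hp : p u = true
    · simp [List.filter_cons, hp, h u hp]; omega
    · simp only [List.filter_cons]
      rw [Bool.not_eq_true] at hp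
      rw [hp]
      cases hq : q u <;> simp <;> omega

theorem pvFilterLenStrict (p q : Int → Bool) (h : ∀ u, p u = true → q u = true)
    (x : Int) (hqx : q x = true) (hpx : p x = false) :
    ∀ U : List Int, x ∈ U → (U.filter p).length < (U.filter q).length := by
  intro U
  induction U with
  | nil => intro hx; simp at hx
  | cons u U ih =>
    intro hx
    rcases List.mem_cons.mp hx with hx | hx
    · subst hx
      simp only [List.filter_cons, hpx, hqx]
      simp only [Bool.false_eq_true, if_false, if_true, List.length_cons]
      exact Nat.lt_succ_of_le (pvFilterLenMono U p q h)
    · have := ih hx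
      by_cases hp : p u = true
      · simp [hp, h u hp]; omega
      · simp only [List.filter_cons]
        rw [Bool.not_eq_true] at hp
        rw [hp]
        cases hq : q u <;> simp <;> omega

-- every value in the adjacency dict is itself a key (both endpoints of each edge are
-- inserted); needed for the termination of pvLoopB below
def pvAdjStep (d : PySem.Dict Int (List Int)) (e : List Int) : PySem.Dict Int (List Int) :=
  match e with
  | [x, y] => (d.modify x [] (· ++ [y])).modify y [] (· ++ [x])
  | _ => d

theorem pvAdjInsert_inv (d : PySem.Dict Int (List Int)) (x y : Int)
    (hinv : ∀ z a, a ∈ d.getD z [] → d.contains a = true) :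
    ∀ z a, a ∈ ((d.modify x [] (· ++ [y])).modify y [] (· ++ [x])).getD z [] →
      ((d.modify x [] (· ++ [y])).modify y [] (· ++ [x])).contains a = true := by
  intro z a ha
  simp only [PySem.Dict.getD_modify] at ha
  simp only [PySem.Dict.contains_modify, Bool.or_eq_true, beq_iff_eq]
  split_ifs at ha with h1 h2 h3
  · simp only [List.mem_append, List.mem_singleton] at ha
    rcases ha with (h | h) | h
    · exact Or.inr (Or.inr (hinv _ _ h))
    · exact Or.inl h
    · exact Or.inr (Or.inl h)
  · simp only [List.mem_append, List.mem_singleton] at ha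
    rcases ha with h | h
    · exact Or.inr (Or.inr (hinv _ _ h))
    · exact Or.inr (Or.inl h)
  · simp only [List.mem_append, List.mem_singleton] at ha
    rcases ha with h | h
    · exact Or.inr (Or.inr (hinv _ _ h))
    · exact Or.inl h
  · exact Or.inr (Or.inr (hinv _ _ ha))

theorem pvBuildInvAux (es : List (List Int)) :
    ∀ d : PySem.Dict Int (List Int),
      (∀ z a, a ∈ d.getD z [] → d.contains a = true) →
      ∀ z a, a ∈ (es.foldl pvAdjStep d).getD z [] → (es.foldl pvAdjStep d).contains a = true := by
  induction es with
  | nil => intro d h; simpa using h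
  | cons e es ih =>
    intro d h
    refine ih (pvAdjStep d e) ?_
    match e with
    | [] => exact h
    | [x] => exact h
    | [x, y] => exact pvAdjInsert_inv d x y h
    | x :: y :: z :: t => exact h

theorem pvBuildAdjB_vals_keys (edges : List (List Int)) :
    ∀ x a, a ∈ (pvBuildAdjB edges).getD x [] →
      (pvBuildAdjB edges).keys.contains a = true := by
  have hb : pvBuildAdjB edges = edges.foldl pvAdjStep PySem.Dict.empty := rfl
  rw [hb]
  intro x a ha
  have h := pvBuildInvAux edges PySem.Dict.empty (by simp [PySem.Dict.getD_empty]) x a ha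
  rw [PySem.Dict.contains_iff_mem_keys] at h
  simpa using h

-- the iterative DFS loop of B; stack head = top of the Python stack
def pvLoopB (edges : List (List Int)) (res : PySem.Set Int) :
    List Int → PySem.Set Int → Int → Int
  | [], _, c => c
  | node :: st, v, c =>
    if PySem.Set.contains res node || PySem.Set.contains v node then
      pvLoopB edges res st v c
    else
      pvLoopB edges res ((pvBuildAdjB edges).getD node [] ++ st)
        (PySem.Set.add v node) (c + 1)
termination_by st v _ =>
  ((((pvBuildAdjB edges).keys.filter (fun u => !v.contains u)).length
      + (st.filter (fun u => !(pvBuildAdjB edges).keys.contains u)).length), st.length)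
decreasing_by
  · rename_i hcond
    simp only [List.filter_cons]
    cases hc : (pvBuildAdjB edges).keys.contains node
    · simp only [hc, Bool.not_false, if_true, List.length_cons]
      exact Prod.Lex.left _ _ (by omega)
    · simp only [hc, Bool.not_true, Bool.false_eq_true, if_false]
      exact Prod.Lex.right _ (by simp)
  · rename_i hcond
    have hv : v.contains node = false := by
      cases h' : v.contains node
      · rfl
      · exact absurd (Or.inr h') (by simpa using hcond)
    have hnil : List.filter (fun u => !(pvBuildAdjB edges).keys.contains u)
        ((pvBuildAdjB edges).getD node []) = [] := by
      rw [List.filter_eq_nil_iff]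
      intro a ha
      simpa using pvBuildAdjB_vals_keys edges node a ha
    have hmono : ∀ u : Int, (!(PySem.Set.add v node).contains u) = true →
        (!v.contains u) = true := by
      intro u hu
      simp at hu ⊢
      exact hu.1
    have hA := pvFilterLenMono (pvBuildAdjB edges).keys _ _ hmono
    rw [List.filter_append, hnil, List.nil_append, List.filter_cons]
    apply Prod.Lex.left
    cases hc : (pvBuildAdjB edges).keys.contains node
    · simp only [hc, Bool.not_false, if_true, List.length_cons]
      omega
    · have hstrict := pvFilterLenStrict _ _ hmono node (by simpa using hv)
        (by simp) (pvBuildAdjB edges).keys (by simpa using hc)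
      simp only [hc, Bool.not_true, Bool.false_eq_true, if_false]
      omega

def reachableNodes_alt (n : Int) (edges : List (List Int)) (restricted : List Int) : Int :=
  let blocked := PySem.Set.ofList restricted
  pvLoopB edges blocked [0] PySem.Set.empty 0

-- ===== PRECONDITION & SPEC =====
-- Pre_ excludes exactly the inputs where Python A raises: an edge that is not a 2-element
-- list makes 'for x, y in edges' raise ValueError.
def Pre_reachableNodes (n : Int) (edges : List (List Int)) (restricted : List Int) : Prop :=
  ∀ e ∈ edges, e.length = 2
instance (n : Int) (edges : List (List Int)) (restricted : List Int) : Decidable (Pre_reachableNodes n edges restricted) := by unfold Pre_reachableNodes; infer_instance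

def pvWitness_reachableNodes : Int × List (List Int) × List Int := (3, [[0, 1], [1, 2]], [2])

def Spec_reachableNodes (n : Int) (edges : List (List Int)) (restricted : List Int) (out : Int) : Prop := out = reachableNodes_alt n edges restricted
instance (n : Int) (edges : List (List Int)) (restricted : List Int) (out : Int) : Decidable (Spec_reachableNodes n edges restricted out) := by unfold Spec_reachableNodes; infer_instance

-- ===== CLAIM (what is proved, stated in full; the proofs are below) =====
def Claim_equal_reachableNodes : Prop := ∀ (n : Int) (edges : List (List Int)) (restricted : List Int), Dom_reachableNodes n edges restricted → Pre_reachableNodes n edges restricted → Spec_reachableNodes n edges restricted (reachableNodes n edges restricted)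

-- ===== LEMMAS AND PROOFS =====

-- the two adjacency builders are definitionally the same function
theorem pvBuildAdj_eq : pvBuildAdjA = pvBuildAdjB := rfl

-- fuel sufficiency for A's dfs: with more fuel than unvisited universe nodes, dfs returns,
-- the visited set only grows, and it grows only inside the universe 0 :: adj.keys
theorem pvDfsA_suff (res : PySem.Set Int) (adj : PySem.Dict Int (List Int))
    (hvk : ∀ x a, a ∈ adj.getD x [] → adj.contains a = true) :
    ∀ (f : Nat) (node : Int) (v : PySem.Set Int),
      node ∈ (0 :: adj.keys) →
      ((0 :: adj.keys).filter (fun u => !v.contains u)).length < f →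
      ∃ d v', pvDfsA res adj f node v = some (d, v') ∧
        (∀ x ∈ v, x ∈ v') ∧ (∀ x ∈ v', x ∈ v ∨ x ∈ (0 :: adj.keys)) := by
  intro f
  induction f with
  | zero => intro node v _ h; omega
  | succ f ih =>
    intro node v hnode hm
    rw [pvDfsA]
    by_cases hcond : (PySem.Set.contains res node || PySem.Set.contains v node) = true
    · rw [if_pos hcond]
      exact ⟨0, v, rfl, fun x hx => hx, fun x hx => Or.inl hx⟩
    · rw [if_neg hcond]
      have hnv : node ∉ v := by
        intro hmem
        apply hcond
        simp [hmem]
      have hmono : ∀ u : Int, (!(PySem.Set.add v node).contains u) = true →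
          (!v.contains u) = true := by
        intro u hu
        simp at hu ⊢
        exact hu.1
      have hdec : ((0 :: adj.keys).filter (fun u => !(PySem.Set.add v node).contains u)).length
          < ((0 :: adj.keys).filter (fun u => !v.contains u)).length :=
        pvFilterLenStrict _ _ hmono node (by simpa using hnv) (by simp) _ hnode
      have hfold : ∀ (l : List Int), (∀ a ∈ l, a ∈ (0 :: adj.keys)) →
          ∀ (s : Int) (w : PySem.Set Int),
            ((0 :: adj.keys).filter (fun u => !w.contains u)).length < f →
            ∃ d' v'', l.foldl (fun acc a => acc.bind fun sv =>
                (pvDfsA res adj f a sv.2).map fun r => (sv.1 + r.1, r.2))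
                (some (s, w)) = some (d', v'') ∧
              (∀ x ∈ w, x ∈ v'') ∧ (∀ x ∈ v'', x ∈ w ∨ x ∈ (0 :: adj.keys)) := by
        intro l
        induction l with
        | nil =>
          intro _ s w _
          exact ⟨s, w, rfl, fun x hx => hx, fun x hx => Or.inl hx⟩
        | cons a l ihl =>
          intro hmem s w hw
          obtain ⟨da, wa, hda, hgrow, hpost⟩ := ih a w (hmem a (by simp)) hw
          have hwa : ((0 :: adj.keys).filter (fun u => !wa.contains u)).length < f := by
            have hle := pvFilterLenMono (0 :: adj.keys)
              (fun u => !wa.contains u) (fun u => !w.contains u) ?_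
            · omega
            · intro u hu
              simp at hu ⊢
              intro hmemu
              exact hu (hgrow u hmemu)
          obtain ⟨d', v'', heq, hgrow', hpost'⟩ := ihl (fun b hb => hmem b (by simp [hb])) (s + da) wa hwa
          refine ⟨d', v'', ?_, ?_, ?_⟩
          · rw [List.foldl_cons]
            simp only [Option.bind_some, hda, Option.map_some]
            exact heq
          · exact fun x hx => hgrow' x (hgrow x hx)
          · intro x hx
            rcases hpost' x hx with h | h
            · exact hpost x h
            · exact Or.inr h
      have hmlt : ((0 :: adj.keys).filter
          (fun u => !(PySem.Set.add v node).contains u)).length < f := by omega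
      obtain ⟨d', v'', heq, hgrow, hpost⟩ := hfold (adj.getD node [])
        (fun a ha => by
          have := hvk node a ha
          rw [PySem.Dict.contains_iff_mem_keys] at this
          simp [this]) 1 (PySem.Set.add v node) hmlt
      refine ⟨d', v'', heq, ?_, ?_⟩
      · intro x hx
        exact hgrow x (by simp [hx])
      · intro x hx
        rcases hpost x hx with h | h
        · rcases (by simpa using h : x ∈ v ∨ x = node) with h2 | h2
          · exact Or.inl h2
          · subst h2; exact Or.inr hnode
        · exact Or.inr h

theorem pvLoopB_nil (edges : List (List Int)) (res : PySem.Set Int)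
    (v : PySem.Set Int) (c : Int) : pvLoopB edges res [] v c = c := by
  unfold pvLoopB
  rfl

theorem pvLoopB_cons (edges : List (List Int)) (res : PySem.Set Int) (node : Int)
    (st : List Int) (v : PySem.Set Int) (c : Int) :
    pvLoopB edges res (node :: st) v c =
      if PySem.Set.contains res node || PySem.Set.contains v node then
        pvLoopB edges res st v c
      else
        pvLoopB edges res ((pvBuildAdjB edges).getD node [] ++ st)
          (PySem.Set.add v node) (c + 1) := by
  rw [pvLoopB]

theorem pvFoldNone (res : PySem.Set Int) (adj : PySem.Dict Int (List Int)) (f : Nat) :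
    ∀ l : List Int,
      l.foldl (fun acc a => acc.bind fun sv =>
        (pvDfsA res adj f a sv.2).map fun r => (sv.1 + r.1, r.2))
        (none : Option (Int × PySem.Set Int)) = none := by
  intro l
  induction l with
  | nil => rfl
  | cons a l ihl => simpa using ihl

-- simulation: one dfs call equals popping that node on B's stack
theorem pvSim (edges : List (List Int)) (res : PySem.Set Int) :
    ∀ (f : Nat) (node : Int) (v : PySem.Set Int) (d : Int) (v' : PySem.Set Int),
      pvDfsA res (pvBuildAdjA edges) f node v = some (d, v') →
      ∀ (st : List Int) (c : Int),
        pvLoopB edges res (node :: st) v c = pvLoopB edges res st v' (c + d) := by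
  intro f
  induction f with
  | zero => intro node v d v' h; simp [pvDfsA] at h
  | succ f ih =>
    intro node v d v' h st c
    rw [pvDfsA] at h
    by_cases hcond : (PySem.Set.contains res node || PySem.Set.contains v node) = true
    · rw [if_pos hcond] at h
      simp only [Option.some.injEq, Prod.mk.injEq] at h
      obtain ⟨h1, h2⟩ := h
      subst h1; subst h2
      rw [pvLoopB_cons, if_pos hcond]
      simp
    · rw [if_neg hcond] at h
      rw [pvLoopB_cons, if_neg hcond, pvBuildAdj_eq.symm]
      have hfold : ∀ (l : List Int) (s : Int) (w : PySem.Set Int),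
          l.foldl (fun acc a => acc.bind fun sv =>
            (pvDfsA res (pvBuildAdjA edges) f a sv.2).map fun r => (sv.1 + r.1, r.2))
            (some (s, w)) = some (d, v') →
          ∀ (st : List Int) (c : Int),
            pvLoopB edges res (l ++ st) w c = pvLoopB edges res st v' (c + (d - s)) := by
        intro l
        induction l with
        | nil =>
          intro s w hl st c
          simp only [List.foldl_nil, Option.some.injEq, Prod.mk.injEq] at hl
          obtain ⟨h1, h2⟩ := hl
          subst h1; subst h2
          rw [List.nil_append]
          norm_num
        | cons a l ihl =>
          intro s w hl st c
          rw [List.foldl_cons] at hl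
          simp only [Option.bind_some] at hl
          cases hda : pvDfsA res (pvBuildAdjA edges) f a w with
          | none =>
            simp only [hda, Option.map_none] at hl
            rw [pvFoldNone] at hl
            exact absurd hl (by simp)
          | some r =>
            obtain ⟨da, wa⟩ := r
            simp only [hda, Option.map_some] at hl
            have h1 := ih a w da wa hda (l ++ st) c
            rw [List.cons_append, h1]
            have h2 := ihl (s + da) wa hl st (c + da)
            rw [h2]
            congr 1
            ring
      have := hfold _ 1 (PySem.Set.add v node) h st (c + 1)
      rw [this]
      congr 1
      ring

-- ===== VERDICT (by name: the statement is the Claim_ definition above) =====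
theorem reachableNodes_spec : Claim_equal_reachableNodes := by
  intro n edges restricted _ _
  show reachableNodes n edges restricted = reachableNodes_alt n edges restricted
  have hvk : ∀ x a, a ∈ (pvBuildAdjA edges).getD x [] →
      (pvBuildAdjA edges).contains a = true :=
    fun x a ha => pvBuildInvAux edges PySem.Dict.empty (by simp [PySem.Dict.getD_empty]) x a ha
  obtain ⟨d, v', heq, -, -⟩ := pvDfsA_suff (PySem.Set.ofList restricted)
    (pvBuildAdjA edges) hvk ((pvBuildAdjA edges).keys.length + 2) 0 PySem.Set.empty
    (by simp) (by simp [List.filter])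
  have hA : reachableNodes n edges restricted = d := by
    show (match pvDfsA (PySem.Set.ofList restricted) (pvBuildAdjA edges)
        ((pvBuildAdjA edges).keys.length + 2) 0 PySem.Set.empty with
      | some r => r.1
      | none => 0) = d
    rw [heq]
  rw [hA]
  have hsim := pvSim edges (PySem.Set.ofList restricted) _ 0 PySem.Set.empty d v' heq [] 0
  have hB : reachableNodes_alt n edges restricted = d := by
    show pvLoopB edges (PySem.Set.ofList restricted) [0] PySem.Set.empty 0 = d
    rw [hsim, pvLoopB_nil]
    omega
  rw [hB]
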